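-- pv_equiv track=rewrite | github.com/JiinJie/Python_algorithm_exercise | 算法汇总/牛客hw/2_中等/HJ29_字符串加解密.py | my_decode
-- ===== SOURCE A (Python) =====
-- def my_decode(enc_str):
--     enc_str = str(enc_str)
--     org_str = ''
--     for i in enc_str:
--         if i == "a":
--             org_str += 'Z'
--         elif i == 'A':
--             org_str += 'z'
--         elif i.islower():
--             org_str += chr(ord(i.upper())-1)
--         elif i.isupper():
--             org_str += chr(ord(i.lower())-1)
--         elif i.isdigit():
--             org_str += str((int(i)+9)%10)
--         else:
--             org_str += i
--     return org_str
-- ===== SOURCE B (Python) =====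
-- _SRC = 'abcdefghijklmnopqrstuvwxyzABCDEFGHIJKLMNOPQRSTUVWXYZ0123456789'
-- _DST = 'ZABCDEFGHIJKLMNOPQRSTUVWXYzabcdefghijklmnopqrstuvwxy9012345678'
-- _TABLE = str.maketrans(_SRC, _DST)
--
-- def my_decode(enc_str):
--     return str(enc_str).translate(_TABLE)
-- ===== Notes on version B (the rewrite author's own statement) =====
-- stated objective: idiomatic
-- what changed: The per-character six-way if/elif branch loop with string concatenation is replaced by a translation table built once with str.maketrans and a single table-driven pass via str.translate.
import Mathlib
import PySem

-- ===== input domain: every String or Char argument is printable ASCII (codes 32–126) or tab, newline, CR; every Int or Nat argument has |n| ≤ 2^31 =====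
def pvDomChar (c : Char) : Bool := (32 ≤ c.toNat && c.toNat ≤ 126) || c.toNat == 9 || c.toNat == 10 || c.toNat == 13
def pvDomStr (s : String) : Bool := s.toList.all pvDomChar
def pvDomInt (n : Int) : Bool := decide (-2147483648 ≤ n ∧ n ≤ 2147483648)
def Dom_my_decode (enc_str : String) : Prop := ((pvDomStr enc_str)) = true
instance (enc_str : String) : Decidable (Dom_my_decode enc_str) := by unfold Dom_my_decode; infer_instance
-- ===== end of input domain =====

-- B replaces A's six-way per-character branch loop by a translation table built once
-- (str.maketrans) and a single table-driven pass (str.translate): more idiomatic.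

-- ===== PORT A =====
-- literal transliteration: loop over the characters, 6-way branch, string accumulator
def my_decode (enc_str : String) : String :=
  String.mk (enc_str.toList.foldl (fun org_str i =>
    if i == 'a' then org_str ++ ['Z']
    else if i == 'A' then org_str ++ ['z']
    else if PySem.Chars.islower i then
      org_str ++ [Char.ofNat ((PySem.Chars.upperChar i).toNat - 1)]
    else if PySem.Chars.isupper i then
      org_str ++ [Char.ofNat ((PySem.Chars.lowerChar i).toNat - 1)]
    else if PySem.Chars.isdigit i then
      -- int(i) cannot fail in this branch (i is a digit); getD 0 is the Option unwrap
      org_str ++ PySem.Int.toChars (PySem.Int.mod ((PySem.Int.ofChars? [i]).getD 0 + 9) 10)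
    else org_str ++ [i]) [])

-- ===== PORT B =====
-- the maketrans table: the 62 source chars zipped with their decoded chars
def pvDecTable : PySem.Dict Char Char :=
  PySem.Dict.ofList
    (List.zip "abcdefghijklmnopqrstuvwxyzABCDEFGHIJKLMNOPQRSTUVWXYZ0123456789".toList
              "ZABCDEFGHIJKLMNOPQRSTUVWXYzabcdefghijklmnopqrstuvwxy9012345678".toList)

-- str.translate: one pass, each char replaced by its table entry, untabled chars kept
def my_decode_alt (enc_str : String) : String :=
  String.mk (enc_str.toList.map (fun c => pvDecTable.getD c c))

-- ===== PRECONDITION & SPEC =====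
def Spec_my_decode (enc_str : String) (out : String) : Prop := out = my_decode_alt enc_str
instance (enc_str : String) (out : String) : Decidable (Spec_my_decode enc_str out) := by unfold Spec_my_decode; infer_instance

-- ===== CLAIM (what is proved, stated in full; the proofs are below) =====
def Claim_equal_my_decode : Prop := ∀ (enc_str : String), Dom_my_decode enc_str → Spec_my_decode enc_str (my_decode enc_str)

-- ===== LEMMAS AND PROOFS =====

-- A's per-character branch, as a list-valued step (what each iteration appends)
def pvStepA (i : Char) : List Char :=
  if i == 'a' then ['Z']
  else if i == 'A' then ['z']
  else if PySem.Chars.islower i then [Char.ofNat ((PySem.Chars.upperChar i).toNat - 1)]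
  else if PySem.Chars.isupper i then [Char.ofNat ((PySem.Chars.lowerChar i).toNat - 1)]
  else if PySem.Chars.isdigit i then
    PySem.Int.toChars (PySem.Int.mod ((PySem.Int.ofChars? [i]).getD 0 + 9) 10)
  else [i]

-- A's branch agrees with B's table on every character with code < 127 (one evaluation)
set_option maxRecDepth 20000 in
theorem pvStepA_agrees : (((List.range 127).map Char.ofNat).all
    (fun c => pvStepA c == [pvDecTable.getD c c])) = true := by rfl

theorem pvStepA_agrees' (c : Char) (h : pvDomChar c = true) :
    pvStepA c = [pvDecTable.getD c c] := by
  have h127 : c.toNat < 127 := by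
    simp only [pvDomChar, Bool.or_eq_true, Bool.and_eq_true, decide_eq_true_eq,
      beq_iff_eq] at h
    omega
  have hmem : c ∈ (List.range 127).map Char.ofNat := by
    have h1 : Char.ofNat c.toNat ∈ (List.range 127).map Char.ofNat :=
      List.mem_map_of_mem (List.mem_range.mpr h127)
    rwa [Char.ofNat_toNat] at h1
  exact eq_of_beq (List.all_eq_true.mp pvStepA_agrees c hmem)

theorem pvFlatMap_eq_map (l : List Char) (h : ∀ c ∈ l, pvDomChar c = true) :
    l.flatMap pvStepA = l.map (fun c => pvDecTable.getD c c) := by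
  induction l with
  | nil => rfl
  | cons x xs ih =>
    simp only [List.flatMap_cons, List.map_cons]
    rw [pvStepA_agrees' x (h x (by simp)), ih (fun c hc => h c (by simp [hc]))]
    rfl

-- ===== VERDICT (by name: the statement is the Claim_ definition above) =====
theorem my_decode_spec : Claim_equal_my_decode := by
  intro s hdom
  unfold Spec_my_decode my_decode my_decode_alt
  have hstep : (fun (org_str : List Char) (i : Char) =>
      if i == 'a' then org_str ++ ['Z']
      else if i == 'A' then org_str ++ ['z']
      else if PySem.Chars.islower i then
        org_str ++ [Char.ofNat ((PySem.Chars.upperChar i).toNat - 1)]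
      else if PySem.Chars.isupper i then
        org_str ++ [Char.ofNat ((PySem.Chars.lowerChar i).toNat - 1)]
      else if PySem.Chars.isdigit i then
        org_str ++ PySem.Int.toChars (PySem.Int.mod ((PySem.Int.ofChars? [i]).getD 0 + 9) 10)
      else org_str ++ [i]) = (fun org_str i => org_str ++ pvStepA i) := by
    funext org_str i
    unfold pvStepA
    split_ifs <;> rfl
  rw [hstep, PySem.List.foldl_append_eq_flatMap pvStepA, List.nil_append,
    pvFlatMap_eq_map _ (by simpa [pvDomStr, List.all_eq_true, Dom_my_decode] using hdom)]
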